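-- pv_equiv track=rewrite | github.com/msjo91/BD_SNU | programming/QTR1/assignment/0710_recursive.py | f14
-- ===== SOURCE A (Python) =====
-- def f14(lst):
--     """
--     Return the first odd number or None if there are no odd numbers in a list.
--     """
--     if len(lst) == 0:
--         return None
--     else:
--         if lst[0] % 2 == 1:
--             return lst[0]
--         else:
--             return f14(lst[1:])
-- ===== SOURCE B (Python) =====
-- def f14(lst):
--     """
--     Return the first odd number or None if there are no odd numbers in a list.
--     """
--     return next((x for x in lst if x % 2 == 1), None)
-- ===== Notes on version B (the rewrite author's own statement) =====
-- stated objective: idiomatic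
-- what changed: Replaced the recursive tail-slice (which copies the list on every step) with a single generator pass using next(..., None).
import Mathlib
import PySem

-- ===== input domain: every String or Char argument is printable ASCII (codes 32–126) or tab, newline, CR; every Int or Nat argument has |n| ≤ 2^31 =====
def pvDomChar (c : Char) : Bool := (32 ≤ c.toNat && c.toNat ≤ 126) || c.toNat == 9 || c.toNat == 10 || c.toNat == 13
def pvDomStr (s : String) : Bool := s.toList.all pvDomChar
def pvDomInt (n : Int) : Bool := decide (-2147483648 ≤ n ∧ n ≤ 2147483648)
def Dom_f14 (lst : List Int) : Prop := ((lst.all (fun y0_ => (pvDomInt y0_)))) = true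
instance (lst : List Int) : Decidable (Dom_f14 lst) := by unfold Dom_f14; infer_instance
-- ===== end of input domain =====

-- B replaces A's tail-slice recursion with one idiomatic generator pass (next(..., None)); same result, no per-step list copies.


-- ===== PORT A =====
-- literal transliteration of A: length test, head test via lst[0], recursion on lst[1:]
def f14 (lst : List Int) : Option Int :=
  if lst.length = 0 then none
  else
    if PySem.Int.mod ((PySem.List.pyGet? lst 0).getD 0) 2 = 1 then
      some ((PySem.List.pyGet? lst 0).getD 0)
    else
      f14 (PySem.List.slice lst (some 1) none)
termination_by lst.length
decreasing_by simp [PySem.List.slice_from_one]; omega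

-- ===== PORT B =====
-- B: next((x for x in lst if x % 2 == 1), None) — a single find over the list
def f14_alt (lst : List Int) : Option Int :=
  lst.find? (fun x => PySem.Int.mod x 2 == 1)

-- ===== PRECONDITION & SPEC =====
def Spec_f14 (lst : List Int) (out : Option Int) : Prop := out = f14_alt lst
instance (lst : List Int) (out : Option Int) : Decidable (Spec_f14 lst out) := by unfold Spec_f14; infer_instance

-- ===== CLAIM (what is proved, stated in full; the proofs are below) =====
def Claim_equal_f14 : Prop := ∀ (lst : List Int), Dom_f14 lst → Spec_f14 lst (f14 lst)

-- ===== LEMMAS AND PROOFS =====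

theorem f14_agree (lst : List Int) : f14 lst = f14_alt lst := by
  induction lst with
  | nil => simp [f14, f14_alt]
  | cons x xs ih =>
    rw [f14]
    simp [PySem.List.slice_from_one, f14_alt, List.find?, PySem.List.pyGet?, PySem.List.pyIdx?]
    rw [ih, f14_alt]
    cases hb : (x % 2 == 1) <;> simp_all

-- ===== VERDICT =====
theorem f14_spec : Claim_equal_f14 := by
  intro lst _
  unfold Spec_f14
  exact f14_agree lst
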